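-- pv_equiv track=rewrite | github.com/PnuLikeLion9th/Summer_algorithm | jisu/week6/모의고사.py | solution
-- ===== SOURCE A (Python) =====
-- def solution(answers):
--     answer = []
--     p1 = [1, 2, 3, 4, 5]
--     p2 = [2, 1, 2, 3, 2, 4, 2, 5]
--     p3 = [3, 3, 1, 1, 2, 2, 4, 4, 5, 5]
--     cnt = [0, 0, 0]
--
--     for i in range(len(answers)):
--         if answers[i] == p1[i % 5]:
--             cnt[0] += 1
--         if answers[i] == p2[i % 8]:
--             cnt[1] += 1
--         if answers[i] == p3[i % 10]:
--             cnt[2] += 1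
--
--     for i in range(len(cnt)):
--         if max(cnt) == cnt[i]:
--             answer.append(i+1)
--
--     return answer
-- ===== SOURCE B (Python) =====
-- def solution(answers):
--     patterns = [[1, 2, 3, 4, 5],
--                 [2, 1, 2, 3, 2, 4, 2, 5],
--                 [3, 3, 1, 1, 2, 2, 4, 4, 5, 5]]
--     # one pass: histogram keyed by (position mod 40, answer); 40 = lcm(5, 8, 10),
--     # so the residue mod 40 determines which pattern value sits at that position
--     hist = {}
--     for i, a in enumerate(answers):
--         k = (i % 40, a)
--         hist[k] = hist.get(k, 0) + 1
--     cnt = [sum(hist.get((r, p[r % len(p)]), 0) for r in range(40)) for p in patterns]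
--     best = max(cnt)
--     return [i + 1 for i, c in enumerate(cnt) if c == best]
-- ===== Notes on version B (the rewrite author's own statement) =====
-- stated objective: alternative
-- what changed: B replaces A's per-element comparison against all three cyclic patterns by one pass that builds a (position mod 40, answer) frequency dictionary (40 = lcm of the pattern lengths) and then scores each pattern with 40 histogram lookups; selection is a comprehension over enumerate instead of an append loop.
import Mathlib
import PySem

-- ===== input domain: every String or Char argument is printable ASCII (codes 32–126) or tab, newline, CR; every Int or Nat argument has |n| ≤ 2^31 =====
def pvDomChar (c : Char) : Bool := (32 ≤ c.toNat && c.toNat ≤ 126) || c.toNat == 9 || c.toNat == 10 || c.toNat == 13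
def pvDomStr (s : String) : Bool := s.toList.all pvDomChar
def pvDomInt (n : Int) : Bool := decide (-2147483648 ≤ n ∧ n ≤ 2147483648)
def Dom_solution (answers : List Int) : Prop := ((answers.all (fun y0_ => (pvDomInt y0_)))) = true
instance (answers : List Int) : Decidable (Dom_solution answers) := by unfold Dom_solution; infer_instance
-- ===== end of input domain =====

-- B replaces A's per-element comparison against the three cyclic patterns by a single pass
-- building a (position mod 40, answer) frequency dictionary (40 = lcm of the pattern lengths),
-- then scores each pattern with 40 histogram lookups; same O(n) cost, different data structure.

-- ===== PORT A =====
-- indices i, i % 5, i % 8, i % 10 are always in range, so pyGetD's default is never used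
def solution (answers : List Int) : List Int :=
  let p1 : List Int := [1, 2, 3, 4, 5]
  let p2 : List Int := [2, 1, 2, 3, 2, 4, 2, 5]
  let p3 : List Int := [3, 3, 1, 1, 2, 2, 4, 4, 5, 5]
  let cnt : Int × Int × Int :=
    (PySem.List.pyRange 0 (answers.length : Int) 1).foldl
      (fun c i =>
        let c0 := if PySem.List.pyGetD answers i 0 = PySem.List.pyGetD p1 (PySem.Int.mod i 5) 0 then c.1 + 1 else c.1
        let c1 := if PySem.List.pyGetD answers i 0 = PySem.List.pyGetD p2 (PySem.Int.mod i 8) 0 then c.2.1 + 1 else c.2.1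
        let c2 := if PySem.List.pyGetD answers i 0 = PySem.List.pyGetD p3 (PySem.Int.mod i 10) 0 then c.2.2 + 1 else c.2.2
        (c0, c1, c2)) (0, 0, 0)
  let cntL : List Int := [cnt.1, cnt.2.1, cnt.2.2]
  let m := (PySem.List.max? cntL (fun x => x)).getD 0
  (PySem.List.pyRange 0 3 1).foldl
    (fun acc i => if m = PySem.List.pyGetD cntL i 0 then acc ++ [i + 1] else acc) []

-- ===== PORT B =====
def solution_alt (answers : List Int) : List Int :=
  let patterns : List (List Int) :=
    [[1, 2, 3, 4, 5], [2, 1, 2, 3, 2, 4, 2, 5], [3, 3, 1, 1, 2, 2, 4, 4, 5, 5]]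
  let hist : PySem.Dict (Int × Int) Int :=
    (PySem.List.enumerate answers).foldl
      (fun d ia =>
        let k : Int × Int := (PySem.Int.mod ia.1 40, ia.2)
        d.insert k (d.getD k 0 + 1)) PySem.Dict.empty
  let cnt : List Int := patterns.map (fun p =>
    ((PySem.List.pyRange 0 40 1).map
      (fun r => hist.getD (r, PySem.List.pyGetD p (PySem.Int.mod r (p.length : Int)) 0) 0)).sum)
  let best := (PySem.List.max? cnt (fun x => x)).getD 0
  ((PySem.List.enumerate cnt).filter (fun ic => ic.2 == best)).map (fun ic => ic.1 + 1)

-- ===== PRECONDITION & SPEC =====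
def Spec_solution (answers : List Int) (out : List Int) : Prop := out = solution_alt answers
instance (answers : List Int) (out : List Int) : Decidable (Spec_solution answers out) := by unfold Spec_solution; infer_instance

-- ===== CLAIM (what is proved, stated in full; the proofs are below) =====
def Claim_equal_solution : Prop := ∀ (answers : List Int), Dom_solution answers → Spec_solution answers (solution answers)

-- ===== LEMMAS AND PROOFS =====

-- if x's residue is not among rs, every indicator term is 0
theorem pv_ind_zero (v : Int → Int) (x : Int × Int) (rs : List Int) (hx : x.1 ∉ rs) :
    (rs.map (fun r => if x = (r, v r) then (1 : Int) else 0)).sum = 0 := by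
  induction rs with
  | nil => rfl
  | cons r t ih =>
    simp only [List.mem_cons, not_or] at hx
    have hne : x ≠ (r, v r) := by
      intro h; exact hx.1 (by rw [h])
    simp [hne, ih hx.2]

-- x's residue occurs exactly once in the distinct residue list rs, so the indicator
-- sum over rs is 1 or 0 according to whether x matches its own residue's pattern value
theorem pv_ind_one (v : Int → Int) (x : Int × Int) (rs : List Int) (hnd : rs.Nodup) (hx : x.1 ∈ rs) :
    (rs.map (fun r => if x = (r, v r) then (1 : Int) else 0)).sum
      = if x.2 = v x.1 then 1 else 0 := by
  induction rs with
  | nil => cases hx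
  | cons r t ih =>
    rcases List.nodup_cons.mp hnd with ⟨hr, hndt⟩
    rcases List.mem_cons.mp hx with h1 | h2
    · subst h1
      have hz := pv_ind_zero v x t hr
      by_cases h : x.2 = v x.1
      · have : x = (x.1, v x.1) := by
          cases x; simp_all
        simp [← this, h, hz]
      · have : x ≠ (x.1, v x.1) := by
          intro hh; exact h (by rw [hh])
        simp [this, h, hz]
    · have hne : x ≠ (r, v r) := by
        intro hh
        have hx1 : x.1 = r := by simpa using congrArg Prod.fst hh
        exact hr (hx1 ▸ h2)
      simp [hne, ih hndt h2]

-- summing the per-residue counts over distinct residues counts the pairs matching their own residue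
theorem pv_sum_count (v : Int → Int) (rs : List Int) (hnd : rs.Nodup) (l : List (Int × Int))
    (h : ∀ x ∈ l, x.1 ∈ rs) :
    (rs.map (fun r => ((l.count (r, v r) : Nat) : Int))).sum
      = (l.countP (fun x => x.2 == v x.1) : Int) := by
  induction l with
  | nil => simp
  | cons x t ih =>
    have ht : ∀ y ∈ t, y.1 ∈ rs := fun y hy => h y (List.mem_cons_of_mem _ hy)
    have hx : x.1 ∈ rs := h x (List.mem_cons_self)
    have step : ∀ r : Int, (((x :: t).count (r, v r) : Nat) : Int)
        = ((t.count (r, v r) : Nat) : Int) + (if x = (r, v r) then 1 else 0) := by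
      intro r
      by_cases hxe : x = (r, v r) <;> simp [hxe]
    calc (rs.map (fun r => (((x :: t).count (r, v r) : Nat) : Int))).sum
        = (rs.map (fun r => ((t.count (r, v r) : Nat) : Int) + (if x = (r, v r) then 1 else 0))).sum := by
          congr 1; exact List.map_congr_left (fun r _ => step r)
      _ = (rs.map (fun r => ((t.count (r, v r) : Nat) : Int))).sum
            + (rs.map (fun r => if x = (r, v r) then (1 : Int) else 0)).sum := by
          rw [← List.sum_map_add]
      _ = (t.countP (fun x => x.2 == v x.1) : Int) + (if x.2 = v x.1 then 1 else 0) := by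
          rw [ih ht, pv_ind_one v x rs hnd hx]
      _ = ((x :: t).countP (fun x => x.2 == v x.1) : Int) := by
          by_cases hm : x.2 = v x.1 <;> simp [hm]

-- B's histogram lookup is a count over the keyed pairs
theorem pv_hist_getD (answers : List Int) (k : Int × Int) :
    ((PySem.List.enumerate answers).foldl
      (fun d ia =>
        let kk : Int × Int := (PySem.Int.mod ia.1 40, ia.2)
        d.insert kk (d.getD kk 0 + 1)) (PySem.Dict.empty : PySem.Dict (Int × Int) Int)).getD k 0
    = ((((PySem.List.enumerate answers).map (fun ia => (PySem.Int.mod ia.1 40, ia.2))).count k : Nat) : Int) := by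
  show (List.foldl
      (fun (d : PySem.Dict (Int × Int) Int) (ia : Int × Int) =>
        d.insert (PySem.Int.mod ia.1 40, ia.2) (d.getD (PySem.Int.mod ia.1 40, ia.2) 0 + 1))
      PySem.Dict.empty (PySem.List.enumerate answers)).getD k 0 = _
  rw [← List.foldl_map (f := fun ia : Int × Int => (PySem.Int.mod ia.1 40, ia.2))
        (g := fun (d : PySem.Dict (Int × Int) Int) x => d.insert x (d.getD x 0 + 1))]
  rw [PySem.Dict.getD_foldl_insert_add_one]
  simp [PySem.Dict.getD_empty]

-- B's 40-lookup score for pattern p equals A's per-index match count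
theorem pv_score_eq (answers p : List Int) (L : Int) (hpos : 0 < L) (hdvd : L ∣ 40) :
    ((PySem.List.pyRange 0 40 1).map
      (fun r => ((PySem.List.enumerate answers).foldl
        (fun d ia =>
          let kk : Int × Int := (PySem.Int.mod ia.1 40, ia.2)
          d.insert kk (d.getD kk 0 + 1)) (PySem.Dict.empty : PySem.Dict (Int × Int) Int)).getD
            (r, PySem.List.pyGetD p (PySem.Int.mod r L) 0) 0)).sum
    = (PySem.List.pyRange 0 (answers.length : Int) 1).foldl
        (fun s i => if PySem.List.pyGetD answers i 0 = PySem.List.pyGetD p (PySem.Int.mod i L) 0 then s + 1 else s) 0 := by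
  have h1 : ∀ r : Int, (List.foldl
        (fun (d : PySem.Dict (Int × Int) Int) (ia : Int × Int) =>
          d.insert (PySem.Int.mod ia.1 40, ia.2) (d.getD (PySem.Int.mod ia.1 40, ia.2) 0 + 1))
        PySem.Dict.empty (PySem.List.enumerate answers)).getD
          (r, PySem.List.pyGetD p (PySem.Int.mod r L) 0) 0
      = ((((PySem.List.enumerate answers).map (fun ia => (PySem.Int.mod ia.1 40, ia.2))).count
          (r, PySem.List.pyGetD p (PySem.Int.mod r L) 0) : Nat) : Int) :=
    fun r => pv_hist_getD answers (r, PySem.List.pyGetD p (PySem.Int.mod r L) 0)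
  refine Eq.trans (congrArg List.sum (List.map_congr_left (fun r _ => h1 r))) ?_
  rw [pv_sum_count (fun r => PySem.List.pyGetD p (PySem.Int.mod r L) 0)
        (PySem.List.pyRange 0 40 1) (by decide)
        ((PySem.List.enumerate answers).map (fun ia => (PySem.Int.mod ia.1 40, ia.2)))
        (by
          intro x hx
          rcases List.mem_map.mp hx with ⟨ia, _, rfl⟩
          rw [PySem.List.mem_pyRange_one]
          exact ⟨PySem.Int.mod_nonneg _ (by norm_num), PySem.Int.mod_lt _ (by norm_num)⟩)]
  rw [PySem.List.foldl_ite_add_one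
        (p := fun i => PySem.List.pyGetD answers i 0 = PySem.List.pyGetD p (PySem.Int.mod i L) 0)]
  rw [PySem.List.enumerate_eq_map_pyRange answers 0, List.map_map, List.countP_map]
  simp only [PySem.List.len, zero_add, Nat.cast_inj]
  apply List.countP_congr
  intro i hi
  rcases PySem.List.mem_pyRange_one.mp hi with ⟨h0, _⟩
  have hvv : PySem.List.pyGetD p (PySem.Int.mod (i % 40) L) 0
      = PySem.List.pyGetD p (PySem.Int.mod i L) 0 := by
    congr 1
    rw [PySem.Int.mod_eq_emod_of_pos hpos, PySem.Int.mod_eq_emod_of_pos hpos]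
    exact Int.emod_emod_of_dvd i hdvd
  rw [Bool.eq_iff_iff]
  simp [Function.comp, hvv]

-- the selection loop of A is B's filter/map over enumerate
theorem pv_select_eq (cntL : List Int) (hlen : cntL.length = 3) (m : Int) :
    (PySem.List.pyRange 0 3 1).foldl
      (fun acc i => if m = PySem.List.pyGetD cntL i 0 then acc ++ [i + 1] else acc) []
      = ((PySem.List.enumerate cntL).filter (fun ic => ic.2 == m)).map (fun ic => ic.1 + 1) := by
  rw [PySem.List.foldl_append_ite (p := fun i => m = PySem.List.pyGetD cntL i 0) (f := fun i => i + 1)]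
  rw [PySem.List.enumerate_eq_map_pyRange cntL 0, List.filter_map, List.map_map]
  simp only [List.nil_append, PySem.List.len, hlen]
  congr 1
  apply List.filter_congr
  intro x _
  rw [Bool.eq_iff_iff]
  simp only [Function.comp_apply, beq_iff_eq, decide_eq_true_eq]
  exact eq_comm

-- ===== VERDICT (by name: the statement is the Claim_ definition above) =====
theorem solution_spec : Claim_equal_solution := by
  intro answers _
  show solution answers = solution_alt answers
  unfold solution solution_alt
  simp only []
  rw [PySem.List.foldl_prod_mk
        (f := fun s i => if PySem.List.pyGetD answers i 0 = PySem.List.pyGetD [(1:Int), 2, 3, 4, 5] (PySem.Int.mod i 5) 0 then s + 1 else s)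
        (g := fun (c : Int × Int) i =>
          (if PySem.List.pyGetD answers i 0 = PySem.List.pyGetD [(2:Int), 1, 2, 3, 2, 4, 2, 5] (PySem.Int.mod i 8) 0 then c.1 + 1 else c.1,
           if PySem.List.pyGetD answers i 0 = PySem.List.pyGetD [(3:Int), 3, 1, 1, 2, 2, 4, 4, 5, 5] (PySem.Int.mod i 10) 0 then c.2 + 1 else c.2))]
  rw [PySem.List.foldl_prod_mk
        (f := fun s i => if PySem.List.pyGetD answers i 0 = PySem.List.pyGetD [(2:Int), 1, 2, 3, 2, 4, 2, 5] (PySem.Int.mod i 8) 0 then s + 1 else s)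
        (g := fun s i => if PySem.List.pyGetD answers i 0 = PySem.List.pyGetD [(3:Int), 3, 1, 1, 2, 2, 4, 4, 5, 5] (PySem.Int.mod i 10) 0 then s + 1 else s)]
  rw [List.map_cons, List.map_cons, List.map_cons, List.map_nil]
  simp only [List.length_cons, List.length_nil]
  rw [← pv_score_eq answers [1, 2, 3, 4, 5] 5 (by norm_num) (by norm_num),
      ← pv_score_eq answers [2, 1, 2, 3, 2, 4, 2, 5] 8 (by norm_num) (by norm_num),
      ← pv_score_eq answers [3, 3, 1, 1, 2, 2, 4, 4, 5, 5] 10 (by norm_num) (by norm_num)]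
  exact pv_select_eq _ rfl _
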